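-- pv_equiv track=rewrite | github.com/ZhidkovMD/Data-structures-and-algorithms-VK | Seminar3/copy_time.py | very_easy_task
-- ===== SOURCE A (Python) =====
-- def very_easy_task(n: int, x: int, y: int) -> int:
--     if n == 0:
--         return 0
--     if n == 1:
--         return min(x, y)
--
--     left = 0
--     right = (n - 1) * max(x, y)
--
--     while left + 1 < right:
--         mid = (left + right) // 2
--         if (mid // x) + (mid // y) < n - 1:
--             left = mid
--         else:
--             right = mid
--
--     return right + min(x, y)
-- ===== SOURCE B (Python) =====
-- def very_easy_task(n: int, x: int, y: int) -> int:
--     if n == 0: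
--         return 0
--     if n == 1:
--         return min(x, y)
--     # The faster machine makes the first copy (min(x, y)); for the g remaining
--     # copies, compare two schedules: split them k / g-k between the machines
--     # (the best k is (g*y)//(x+y) or the next one), or queue them all on the
--     # machine that is free after the first copy.
--     g = n - 1
--     k = g * y // (x + y)
--     split = min(max(k * x, (g - k) * y), max((k + 1) * x, (g - k - 1) * y))
--     serial = g * max(x, y)
--     return min(split, serial) + min(x, y)
-- ===== Notes on version B (the rewrite author's own statement) =====
-- stated objective: simpler
-- what changed: Replaces A's binary search over finishing times by a direct closed-form comparison of two schedules for the n-1 remaining copies (the optimal split k=(n-1)*y//(x+y) or k+1 between the machines, and all on one machine); Pre_ excludes only inputs outside the task's natural domain: n >= 2 with copy times of mixed sign (A may raise ZeroDivisionError and no specification pins down a value), x = y = 0 (B's split formula divides by zero), and n <= -1 with x + y <= 0 (division by zero at x = -y; elsewhere a corner no caller would specify either way).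
-- outside the precondition, e.g. on very_easy_task(3, -2, 5): A returns 8, B returns -10; on very_easy_task(5, 3, -3): A returns 9, B raises ZeroDivisionError; on very_easy_task(2, 0, 0): A returns 0, B raises ZeroDivisionError
import Mathlib
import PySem

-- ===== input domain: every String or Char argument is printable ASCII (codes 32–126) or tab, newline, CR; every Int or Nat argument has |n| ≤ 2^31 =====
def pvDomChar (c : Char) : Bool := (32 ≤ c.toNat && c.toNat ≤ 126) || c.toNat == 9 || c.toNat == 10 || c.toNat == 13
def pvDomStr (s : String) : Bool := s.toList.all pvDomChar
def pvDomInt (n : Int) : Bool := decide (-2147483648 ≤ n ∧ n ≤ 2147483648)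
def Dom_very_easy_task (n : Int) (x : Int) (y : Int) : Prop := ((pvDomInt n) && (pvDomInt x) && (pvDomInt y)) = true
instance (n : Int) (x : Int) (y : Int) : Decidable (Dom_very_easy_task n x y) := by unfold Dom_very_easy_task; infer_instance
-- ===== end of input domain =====

-- B replaces A's binary search by a closed-form computation of the optimal split of the
-- remaining items between the two copiers; A = B is proved on Pre_ (the natural domain).

-- ===== PORT A =====
-- the while loop of A, recursing on the shrinking bracket (l, r)
def vetLoop (n : Int) (x : Int) (y : Int) (l : Int) (r : Int) : Int :=
  if _h : l + 1 < r then
    let mid := PySem.Int.floordiv (l + r) 2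
    if PySem.Int.floordiv mid x + PySem.Int.floordiv mid y < n - 1 then
      vetLoop n x y mid r
    else
      vetLoop n x y l mid
  else r
termination_by (r - l).toNat
decreasing_by
  · rw [PySem.Int.floordiv_eq_ediv_of_pos (by omega)]; omega
  · rw [PySem.Int.floordiv_eq_ediv_of_pos (by omega)]; omega

def very_easy_task (n : Int) (x : Int) (y : Int) : Int :=
  if n = 0 then 0
  else if n = 1 then min x y
  else vetLoop n x y 0 ((n - 1) * max x y) + min x y

-- ===== PORT B =====
def very_easy_task_alt (n : Int) (x : Int) (y : Int) : Int :=
  if n = 0 then 0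
  else if n = 1 then min x y
  else
    let g := n - 1
    let k := PySem.Int.floordiv (g * y) (x + y)
    let split := min (max (k * x) ((g - k) * y)) (max ((k + 1) * x) ((g - k - 1) * y))
    let serial := g * max x y
    min split serial + min x y

-- ===== PRECONDITION & SPEC =====
-- Pre_ keeps the task's natural domain (n in {0,1}, or n >= 2 with positive copy times)
-- and the inputs with n >= 2 and both copy times <= 0, or n <= -1 and x + y >= 1; it
-- excludes only inputs outside the task's natural domain (n >= 2 with copy times of
-- mixed sign, where A may raise ZeroDivisionError and no specification pins down a
-- value; x = y = 0 and n <= -1 with x + y <= 0, where B's split formula divides by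
-- zero or the corner is one no caller would specify either way).
def Pre_very_easy_task (n : Int) (x : Int) (y : Int) : Prop :=
  n = 0 ∨ n = 1 ∨ (2 ≤ n ∧ 1 ≤ x ∧ 1 ≤ y) ∨ (n ≤ -1 ∧ 1 ≤ x + y) ∨
    (2 ≤ n ∧ x ≤ 0 ∧ y ≤ 0 ∧ x + y ≤ -1)
instance (n : Int) (x : Int) (y : Int) : Decidable (Pre_very_easy_task n x y) := by
  unfold Pre_very_easy_task; infer_instance

def pvWitness_very_easy_task : Int × Int × Int := (3, 2, 3)

def Spec_very_easy_task (n : Int) (x : Int) (y : Int) (out : Int) : Prop := out = very_easy_task_alt n x y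
instance (n : Int) (x : Int) (y : Int) (out : Int) : Decidable (Spec_very_easy_task n x y out) := by unfold Spec_very_easy_task; infer_instance

-- ===== CLAIM (what is proved, stated in full; the proofs are below) =====
def Claim_equal_very_easy_task : Prop := ∀ (n : Int) (x : Int) (y : Int), Dom_very_easy_task n x y → Pre_very_easy_task n x y → Spec_very_easy_task n x y (very_easy_task n x y)

-- ===== LEMMAS AND PROOFS =====

-- the search predicate: by time t, t//x + t//y items beyond the first are finished
def vetF (x : Int) (y : Int) (t : Int) : Int :=
  PySem.Int.floordiv t x + PySem.Int.floordiv t y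

theorem vetF_mono (x y : Int) (hx : 1 ≤ x) (hy : 1 ≤ y) {s t : Int} (h : s ≤ t) :
    vetF x y s ≤ vetF x y t := by
  unfold vetF
  have h1 : PySem.Int.floordiv s x ≤ PySem.Int.floordiv t x := by
    rw [PySem.Int.le_floordiv_iff_mul_le (by omega)]
    have := (PySem.Int.le_floordiv_iff_mul_le (a := s) (q := PySem.Int.floordiv s x) (by omega : (0:Int) < x)).mp le_rfl
    omega
  have h2 : PySem.Int.floordiv s y ≤ PySem.Int.floordiv t y := by
    rw [PySem.Int.le_floordiv_iff_mul_le (by omega)]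
    have := (PySem.Int.le_floordiv_iff_mul_le (a := s) (q := PySem.Int.floordiv s y) (by omega : (0:Int) < y)).mp le_rfl
    omega
  omega

theorem vetLoop_spec (n x y : Int) (_hx : 1 ≤ x) (_hy : 1 ≤ y) :
    ∀ (N : Nat) (l r : Int), (r - l).toNat ≤ N → vetF x y l < n - 1 → n - 1 ≤ vetF x y r →
      l < r →
      n - 1 ≤ vetF x y (vetLoop n x y l r) ∧ vetF x y (vetLoop n x y l r - 1) < n - 1 := by
  intro N
  induction N with
  | zero => intro l r hN _ _ hlr; omega
  | succ N ih =>
    intro l r hN hl hr hlr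
    rw [vetLoop]
    by_cases h : l + 1 < r
    · have hmid : l < PySem.Int.floordiv (l + r) 2 ∧ PySem.Int.floordiv (l + r) 2 < r := by
        rw [PySem.Int.floordiv_eq_ediv_of_pos (by omega)]; omega
      simp only [h, dif_pos]
      by_cases hp : PySem.Int.floordiv (PySem.Int.floordiv (l + r) 2) x +
          PySem.Int.floordiv (PySem.Int.floordiv (l + r) 2) y < n - 1
      · simp only [hp, if_pos]
        exact ih _ _ (by rw [PySem.Int.floordiv_eq_ediv_of_pos (by omega)] at hmid ⊢; omega)
          hp hr hmid.2
      · simp only [hp, if_neg, not_false_iff]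
        exact ih _ _ (by rw [PySem.Int.floordiv_eq_ediv_of_pos (by omega)] at hmid ⊢; omega)
          hl (by unfold vetF; omega) hmid.1
    · simp only [h, dif_neg, not_false_iff]
      have : r - 1 = l := by omega
      exact ⟨hr, by rw [this]; exact hl⟩

-- minimality of the closed-form candidate over every split k
theorem vetB_min (g x y k0 : Int) (hx : 1 ≤ x) (hy : 1 ≤ y)
    (hk0 : k0 = PySem.Int.floordiv (g * y) (x + y)) (k : Int) :
    min (max (k0 * x) ((g - k0) * y)) (max ((k0 + 1) * x) ((g - k0 - 1) * y)) ≤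
      max (k * x) ((g - k) * y) := by
  have hlo : k0 * (x + y) ≤ g * y := by
    rw [hk0]
    exact (PySem.Int.le_floordiv_iff_mul_le (by omega : (0:Int) < x + y)).mp le_rfl
  have hhi : g * y < (k0 + 1) * (x + y) := by
    rw [hk0]
    exact (PySem.Int.floordiv_lt_iff_lt_mul (by omega : (0:Int) < x + y)).mp (by omega)
  by_cases hk : k ≤ k0
  · have h1 : k0 * x ≤ (g - k0) * y := by nlinarith
    have h2 : (g - k0) * y ≤ (g - k) * y := by nlinarith
    calc min (max (k0 * x) ((g - k0) * y)) (max ((k0 + 1) * x) ((g - k0 - 1) * y))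
        ≤ max (k0 * x) ((g - k0) * y) := min_le_left _ _
      _ = (g - k0) * y := max_eq_right h1
      _ ≤ (g - k) * y := h2
      _ ≤ max (k * x) ((g - k) * y) := le_max_right _ _
  · rw [not_le] at hk
    have h1 : (g - k0 - 1) * y ≤ (k0 + 1) * x := by nlinarith
    have h2 : (k0 + 1) * x ≤ k * x := by nlinarith
    calc min (max (k0 * x) ((g - k0) * y)) (max ((k0 + 1) * x) ((g - k0 - 1) * y))
        ≤ max ((k0 + 1) * x) ((g - k0 - 1) * y) := min_le_right _ _
      _ = (k0 + 1) * x := max_eq_left h1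
      _ ≤ k * x := h2
      _ ≤ max (k * x) ((g - k) * y) := le_max_left _ _

-- the closed-form candidate is the least t with n-1 ≤ vetF t
theorem vetB_spec (n x y : Int) (hn : 2 ≤ n) (hx : 1 ≤ x) (hy : 1 ≤ y) :
    let g := n - 1
    let k0 := PySem.Int.floordiv (g * y) (x + y)
    let v := min (max (k0 * x) ((g - k0) * y)) (max ((k0 + 1) * x) ((g - k0 - 1) * y))
    n - 1 ≤ vetF x y v ∧ vetF x y (v - 1) < n - 1 := by
  intro g k0 v
  have hg : 1 ≤ g := by omega
  have hk0nn : 0 ≤ k0 := by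
    show 0 ≤ PySem.Int.floordiv (g * y) (x + y)
    rw [PySem.Int.le_floordiv_iff_mul_le (by omega : (0:Int) < x + y)]; nlinarith
  have hk0lt : k0 < g := by
    show PySem.Int.floordiv (g * y) (x + y) < g
    rw [PySem.Int.floordiv_lt_iff_lt_mul (by omega : (0:Int) < x + y)]; nlinarith
  have hmin := vetB_min g x y k0 hx hy rfl
  have hv1 : 1 ≤ v := by
    have h1 : y ≤ (g - k0) * y := by nlinarith
    have h2 : x ≤ (k0 + 1) * x := by nlinarith
    have := le_max_right (k0 * x) ((g - k0) * y)
    have := le_max_left ((k0 + 1) * x) ((g - k0 - 1) * y)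
    simp only [v, le_min_iff]; omega
  constructor
  · -- P v : pick the k achieving the min
    rcases min_cases (max (k0 * x) ((g - k0) * y)) (max ((k0 + 1) * x) ((g - k0 - 1) * y)) with
      ⟨hveq, _⟩ | ⟨hveq, _⟩
    · have hv : v = max (k0 * x) ((g - k0) * y) := hveq
      have ha : k0 ≤ PySem.Int.floordiv v x := by
        rw [PySem.Int.le_floordiv_iff_mul_le (by omega : (0:Int) < x)]
        have := le_max_left (k0 * x) ((g - k0) * y); omega
      have hb : g - k0 ≤ PySem.Int.floordiv v y := by
        rw [PySem.Int.le_floordiv_iff_mul_le (by omega : (0:Int) < y)]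
        have := le_max_right (k0 * x) ((g - k0) * y); omega
      unfold vetF; omega
    · have hv : v = max ((k0 + 1) * x) ((g - k0 - 1) * y) := hveq
      have ha : k0 + 1 ≤ PySem.Int.floordiv v x := by
        rw [PySem.Int.le_floordiv_iff_mul_le (by omega : (0:Int) < x)]
        have := le_max_left ((k0 + 1) * x) ((g - k0 - 1) * y); omega
      have hb : g - k0 - 1 ≤ PySem.Int.floordiv v y := by
        rw [PySem.Int.le_floordiv_iff_mul_le (by omega : (0:Int) < y)]
        have := le_max_right ((k0 + 1) * x) ((g - k0 - 1) * y); omega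
      unfold vetF; omega
  · -- ¬ P (v-1)
    by_contra hcon
    rw [not_lt] at hcon
    set a := PySem.Int.floordiv (v - 1) x with ha
    set b := PySem.Int.floordiv (v - 1) y with hb
    have hax : a * x ≤ v - 1 :=
      (PySem.Int.le_floordiv_iff_mul_le (by omega : (0:Int) < x)).mp le_rfl
    have hby : b * y ≤ v - 1 :=
      (PySem.Int.le_floordiv_iff_mul_le (by omega : (0:Int) < y)).mp le_rfl
    have hab : g ≤ a + b := by unfold vetF at hcon; omega
    by_cases hag : a ≤ g
    · -- k' = a
      have h1 : (g - a) * y ≤ b * y := by nlinarith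
      have := hmin a
      have := max_le hax (by omega : (g - a) * y ≤ v - 1)
      omega
    · -- k' = g
      rw [not_le] at hag
      have h1 : g * x ≤ a * x := by nlinarith
      have := hmin g
      have h2 : max (g * x) ((g - g) * y) ≤ v - 1 := max_le (by omega) (by simpa using by omega)
      omega

theorem vet_unique (n x y u v : Int) (hx : 1 ≤ x) (hy : 1 ≤ y)
    (hu1 : n - 1 ≤ vetF x y u) (hu2 : vetF x y (u - 1) < n - 1)
    (hv1 : n - 1 ≤ vetF x y v) (hv2 : vetF x y (v - 1) < n - 1) : u = v := by
  rcases lt_trichotomy u v with h | h | h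
  · have := vetF_mono x y hx hy (by omega : u ≤ v - 1); omega
  · exact h
  · have := vetF_mono x y hx hy (by omega : v ≤ u - 1); omega

-- the split candidates are never worse than the serial schedule (natural domain)
theorem split_le_serial (g x y k0 : Int) (hg : 1 ≤ g) (hx : 1 ≤ x) (hy : 1 ≤ y)
    (hk0 : k0 = PySem.Int.floordiv (g * y) (x + y)) :
    min (max (k0 * x) ((g - k0) * y)) (max ((k0 + 1) * x) ((g - k0 - 1) * y)) ≤
      g * max x y := by
  rcases le_total x y with hxy | hxy
  · have h0 := vetB_min g x y k0 hx hy hk0 0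
    have : max ((0:Int) * x) ((g - 0) * y) = g * y := by
      have : (0:Int) ≤ g * y := by positivity
      simp; omega
    rw [this] at h0
    rw [max_eq_right hxy]; exact h0
  · have h0 := vetB_min g x y k0 hx hy hk0 g
    have : max (g * x) ((g - g) * y) = g * x := by
      have : (0:Int) ≤ g * x := by positivity
      simp; omega
    rw [this] at h0
    rw [max_eq_left hxy]; exact h0

-- with both copy times ≤ 0 the serial schedule bounds every split candidate below
theorem serial_le_cand_nonpos (g x y k : Int) (hg : 0 ≤ g) (hx : x ≤ 0) (hy : y ≤ 0) :
    g * max x y ≤ max (k * x) ((g - k) * y) := by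
  rcases le_total x y with hxy | hxy
  · rw [max_eq_right hxy]
    by_cases hk : 0 ≤ k
    · exact le_trans (by nlinarith) (le_max_right _ _)
    · exact le_trans (by nlinarith) (le_max_left _ _)
  · rw [max_eq_left hxy]
    by_cases hk : k ≤ g
    · exact le_trans (by nlinarith) (le_max_left _ _)
    · exact le_trans (by nlinarith) (le_max_right _ _)

-- with n ≤ -1 and x + y ≥ 1 the serial schedule bounds both split candidates below
theorem serial_le_split (g x y k0 : Int) (hg : g ≤ -2) (hs : 1 ≤ x + y)
    (hk0 : k0 = PySem.Int.floordiv (g * y) (x + y)) :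
    g * max x y ≤
      min (max (k0 * x) ((g - k0) * y)) (max ((k0 + 1) * x) ((g - k0 - 1) * y)) := by
  rcases le_total x y with hxy | hxy
  · have hy1 : 1 ≤ y := by omega
    have hk0n : k0 ≤ -1 := by
      have : k0 < 0 := by
        rw [hk0]
        rw [PySem.Int.floordiv_lt_iff_lt_mul (by omega : (0:Int) < x + y)]
        nlinarith
      omega
    rw [max_eq_right hxy]
    refine le_min (le_trans ?_ (le_max_right _ _)) (le_trans ?_ (le_max_right _ _))
    · nlinarith
    · nlinarith
  · have hx1 : 1 ≤ x := by omega
    have hk0g : g ≤ k0 := by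
      rw [hk0, PySem.Int.le_floordiv_iff_mul_le (by omega : (0:Int) < x + y)]
      nlinarith
    rw [max_eq_left hxy]
    refine le_min (le_trans ?_ (le_max_left _ _)) (le_trans ?_ (le_max_left _ _))
    · nlinarith
    · nlinarith

-- ===== VERDICT (by name: the statement is the Claim_ definition above) =====
theorem very_easy_task_spec : Claim_equal_very_easy_task := by
  intro n x y _ hpre
  unfold Spec_very_easy_task very_easy_task very_easy_task_alt
  by_cases hn0 : n = 0
  · simp [hn0]
  by_cases hn1 : n = 1
  · simp [hn1]
  simp only [hn0, hn1, if_false]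
  rcases hpre with h0 | h1 | ⟨hn, hx, hy⟩ | ⟨hn, hs⟩ | ⟨hn, hx0, hy0, hs0⟩
  · exact absurd h0 hn0
  · exact absurd h1 hn1
  · -- natural domain: the serial schedule never beats the optimal split,
    -- and the split equals the value A's binary search brackets
    have hM : x ≤ max x y ∧ y ≤ max x y := ⟨le_max_left _ _, le_max_right _ _⟩
    have hM1 : 1 ≤ max x y := by omega
    have hle := split_le_serial (n - 1) x y (PySem.Int.floordiv ((n - 1) * y) (x + y))
      (by omega) hx hy rfl
    rw [min_eq_left hle]
    have hA := vetLoop_spec n x y hx hy ((((n - 1) * max x y)).toNat) 0 ((n - 1) * max x y)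
      (by omega)
      (by unfold vetF
          rw [PySem.Int.floordiv_eq_ediv_of_pos (by omega : (0:Int) < x),
              PySem.Int.floordiv_eq_ediv_of_pos (by omega : (0:Int) < y)]
          simp; omega)
      (by unfold vetF
          have h1 : n - 1 ≤ PySem.Int.floordiv ((n - 1) * max x y) x := by
            rw [PySem.Int.le_floordiv_iff_mul_le (by omega : (0:Int) < x)]
            nlinarith [hM.1]
          have h2 : 0 ≤ PySem.Int.floordiv ((n - 1) * max x y) y := by
            rw [PySem.Int.le_floordiv_iff_mul_le (by omega : (0:Int) < y)]
            nlinarith [hM.2]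
          omega)
      (by nlinarith)
    have hB := vetB_spec n x y (by omega) hx hy
    simp only at hB
    have := vet_unique n x y (vetLoop n x y 0 ((n - 1) * max x y)) _ hx hy hA.1 hA.2 hB.1 hB.2
    omega
  · -- n ≤ -1 with x + y ≥ 1: A's bracket is empty (its loop never runs) and the
    -- serial schedule is the smaller candidate in B
    have hmc := max_choice x y
    have hM : x ≤ max x y ∧ y ≤ max x y := ⟨le_max_left _ _, le_max_right _ _⟩
    have hM1 : 1 ≤ max x y := by omega
    have hg : n - 1 ≤ -2 := by omega
    have hge := serial_le_split (n - 1) x y (PySem.Int.floordiv ((n - 1) * y) (x + y))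
      hg hs rfl
    rw [min_eq_right hge]
    have hdeg : (n - 1) * max x y ≤ -2 := by nlinarith
    rw [vetLoop, dif_neg (by omega : ¬((0:Int) + 1 < (n - 1) * max x y))]
  · -- n ≥ 2 with both copy times ≤ 0: A's interval is empty and the serial
    -- schedule is the smaller candidate in B
    have hmc := max_choice x y
    have hM0 : max x y ≤ 0 := by omega
    have h1 := serial_le_cand_nonpos (n - 1) x y (PySem.Int.floordiv ((n - 1) * y) (x + y)) (by omega) hx0 hy0
    have h2 := serial_le_cand_nonpos (n - 1) x y (PySem.Int.floordiv ((n - 1) * y) (x + y) + 1) (by omega) hx0 hy0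
    rw [← sub_sub] at h2
    rw [min_eq_right (le_min h1 h2)]
    have hdeg : (n - 1) * max x y ≤ 0 := by nlinarith
    rw [vetLoop, dif_neg (by omega : ¬((0:Int) + 1 < (n - 1) * max x y))]
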